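-- pv_equiv track=rewrite | github.com/CUNY-AI-Lab/pdf-accessibility-app | backend/app/services/toc_intelligence.py | _best_confidence_label
-- ===== SOURCE A (Python) =====
-- TOC_CONFIDENCE_RANK = {"low": 0, "medium": 1, "high": 2}
--
-- def _best_confidence_label(labels: list[str]) -> str:
--     best = "low"
--     best_rank = -1
--     for label in labels:
--         normalized = str(label or "").strip().lower()
--         rank = TOC_CONFIDENCE_RANK.get(normalized, -1)
--         if rank > best_rank:
--             best = normalized or "low"
--             best_rank = rank
--     return best
-- ===== SOURCE B (Python) =====
-- def _best_confidence_label(labels: list[str]) -> str: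
--     seen = {str(l or "").strip().lower() for l in labels}
--     if "high" in seen:
--         return "high"
--     if "medium" in seen:
--         return "medium"
--     return "low"
-- ===== Notes on version B (the rewrite author's own statement) =====
-- stated objective: simpler
-- what changed: Replaces the rank-tracking argmax loop (best/best_rank state updated per label) with a one-shot set of normalized labels followed by a fixed priority cascade high > medium > low.
import Mathlib
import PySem

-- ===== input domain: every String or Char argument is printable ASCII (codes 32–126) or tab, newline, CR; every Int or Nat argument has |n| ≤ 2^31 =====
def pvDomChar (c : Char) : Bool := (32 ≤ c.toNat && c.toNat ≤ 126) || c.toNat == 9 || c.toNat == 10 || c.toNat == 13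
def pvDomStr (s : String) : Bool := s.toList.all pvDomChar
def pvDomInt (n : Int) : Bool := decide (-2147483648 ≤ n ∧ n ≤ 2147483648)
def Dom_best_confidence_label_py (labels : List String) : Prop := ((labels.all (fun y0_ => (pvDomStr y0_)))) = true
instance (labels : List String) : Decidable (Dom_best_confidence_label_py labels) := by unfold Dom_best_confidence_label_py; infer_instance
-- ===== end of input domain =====

-- B replaces A's rank-tracking argmax loop with a set of normalized labels and a fixed priority cascade (objective: simpler).

-- ===== PORT A =====
def TOC_CONFIDENCE_RANK : PySem.Dict String Int :=
  PySem.Dict.ofList [("low", 0), ("medium", 1), ("high", 2)]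

def best_confidence_label_py (labels : List String) : String :=
  (labels.foldl (fun (st : String × Int) label =>
      let normalized := PySem.Str.lower (PySem.Str.strip label)
      let rank := TOC_CONFIDENCE_RANK.getD normalized (-1)
      if rank > st.2 then ((if normalized = "" then "low" else normalized), rank) else st)
    ("low", -1)).1

-- ===== PORT B =====
def best_confidence_label_py_alt (labels : List String) : String :=
  let seen : PySem.Set String :=
    PySem.Set.ofList (labels.map (fun l => PySem.Str.lower (PySem.Str.strip l)))
  if PySem.Set.contains seen "high" then "high"
  else if PySem.Set.contains seen "medium" then "medium"
  else "low"

-- ===== PRECONDITION & SPEC =====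
def Spec_best_confidence_label_py (labels : List String) (out : String) : Prop := out = best_confidence_label_py_alt labels
instance (labels : List String) (out : String) : Decidable (Spec_best_confidence_label_py labels out) := by unfold Spec_best_confidence_label_py; infer_instance

-- ===== CLAIM (what is proved, stated in full; the proofs are below) =====
def Claim_equal_best_confidence_label_py : Prop := ∀ (labels : List String), Dom_best_confidence_label_py labels → Spec_best_confidence_label_py labels (best_confidence_label_py labels)

-- ===== LEMMAS AND PROOFS =====

-- the normalization both programs perform
def pvNrm (l : String) : String := PySem.Str.lower (PySem.Str.strip l)

-- rank of a normalized label, as A's dict lookup computes it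
def pvRk (s : String) : Int := TOC_CONFIDENCE_RANK.getD s (-1)

lemma pvNrm_def (l : String) : pvNrm l = PySem.Str.lower (PySem.Str.strip l) := rfl

lemma pvRk_def (s : String) : pvRk s = TOC_CONFIDENCE_RANK.getD s (-1) := rfl

lemma toc_mk : TOC_CONFIDENCE_RANK = PySem.Dict.mk [("low", 0), ("medium", 1), ("high", 2)] := by
  decide

lemma pvRk_eq (s : String) :
    pvRk s = if s = "low" then 0 else if s = "medium" then 1 else if s = "high" then 2 else -1 := by
  simp only [pvRk, toc_mk, PySem.Dict.getD, PySem.Dict.get?_mk_cons, beq_iff_eq]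
  by_cases h0 : s = "low"
  · simp [h0]
  · by_cases h1 : s = "medium"
    · simp [h1]
    · by_cases h2 : s = "high"
      · simp [h2]
      · simp [h0, h1, h2, Ne.symm h0, Ne.symm h1, Ne.symm h2, PySem.Dict.get?]

lemma pvRk_eq_two_iff (s : String) : pvRk s = 2 ↔ s = "high" := by
  rw [pvRk_eq]
  split_ifs with a b c
  · subst a; decide
  · subst b; decide
  · subst c; decide
  · simp [c]

lemma pvRk_eq_one_iff (s : String) : pvRk s = 1 ↔ s = "medium" := by
  rw [pvRk_eq]
  split_ifs with a b c
  · subst a; decide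
  · subst b; decide
  · subst c; decide
  · simp [b]

-- canonical tier string for a rank
def pvTier (k : Int) : String := if k = 2 then "high" else if k = 1 then "medium" else "low"

-- max rank accumulated over a list
def pvMx (k : Int) : List String → Int
  | [] => k
  | l :: t => pvMx (max k (pvRk (pvNrm l))) t

lemma pvRk_le_two (s : String) : pvRk s ≤ 2 := by
  rw [pvRk_eq]; split_ifs <;> omega

lemma pvRk_ge (s : String) : -1 ≤ pvRk s := by
  rw [pvRk_eq]; split_ifs <;> omega

lemma pvMx_le_two (labels : List String) (k : Int) (hk : k ≤ 2) : pvMx k labels ≤ 2 := by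
  induction labels generalizing k with
  | nil => exact hk
  | cons l t ih => simp only [pvMx]; exact ih _ (by have := pvRk_le_two (pvNrm l); omega)

lemma le_pvMx (labels : List String) (k : Int) : k ≤ pvMx k labels := by
  induction labels generalizing k with
  | nil => exact le_refl _
  | cons l t ih => simp only [pvMx]; exact le_trans (le_max_left _ _) (ih _)

lemma pvMx_eq_or_mem (labels : List String) (k : Int) :
    pvMx k labels = k ∨ ∃ l ∈ labels, pvMx k labels = pvRk (pvNrm l) := by
  induction labels generalizing k with
  | nil => exact Or.inl rfl
  | cons l t ih =>
    simp only [pvMx]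
    have h := ih (max k (pvRk (pvNrm l)))
    rcases max_cases k (pvRk (pvNrm l)) with ⟨he, _⟩ | ⟨he, _⟩ <;>
      rcases h with h | ⟨l', hl', h⟩
    · exact Or.inl (h.trans he)
    · exact Or.inr ⟨l', List.mem_cons_of_mem _ hl', h⟩
    · exact Or.inr ⟨l, List.mem_cons_self, h.trans he⟩
    · exact Or.inr ⟨l', List.mem_cons_of_mem _ hl', h⟩

lemma pvRk_le_pvMx (labels : List String) (k : Int) (l : String) (hl : l ∈ labels) :
    pvRk (pvNrm l) ≤ pvMx k labels := by
  induction labels generalizing k with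
  | nil => cases hl
  | cons x t ih =>
    simp only [pvMx]
    rcases List.mem_cons.mp hl with rfl | h
    · exact le_trans (le_max_right _ _) (le_pvMx _ _)
    · exact ih _ h

-- A's fold, started from a canonical state (pvTier k, k), ends at (pvTier (pvMx k labels), pvMx k labels)
lemma foldA_eq (labels : List String) (k : Int) (hk : -1 ≤ k) (hk2 : k ≤ 2) :
    labels.foldl (fun (st : String × Int) label =>
      let normalized := PySem.Str.lower (PySem.Str.strip label)
      let rank := TOC_CONFIDENCE_RANK.getD normalized (-1)
      if rank > st.2 then ((if normalized = "" then "low" else normalized), rank) else st)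
      (pvTier k, k)
    = (pvTier (pvMx k labels), pvMx k labels) := by
  induction labels generalizing k with
  | nil => rfl
  | cons l t ih =>
    rw [List.foldl_cons]
    have step : (let normalized := PySem.Str.lower (PySem.Str.strip l)
        let rank := TOC_CONFIDENCE_RANK.getD normalized (-1)
        if rank > (pvTier k, (k : Int)).2 then ((if normalized = "" then "low" else normalized), rank)
        else (pvTier k, k))
        = (pvTier (max k (pvRk (pvNrm l))), max k (pvRk (pvNrm l))) := by
      show (if TOC_CONFIDENCE_RANK.getD (PySem.Str.lower (PySem.Str.strip l)) (-1) > k then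
              ((if PySem.Str.lower (PySem.Str.strip l) = "" then "low"
                else PySem.Str.lower (PySem.Str.strip l)),
               TOC_CONFIDENCE_RANK.getD (PySem.Str.lower (PySem.Str.strip l)) (-1))
            else (pvTier k, k)) = _
      rw [← pvNrm_def, ← pvRk_def]
      have hr := pvRk_eq (pvNrm l)
      by_cases hgt : pvRk (pvNrm l) > k
      · rw [if_pos hgt, max_eq_right (le_of_lt hgt)]
        split_ifs at hr with h0 h1 h2
        · rw [hr]; simp [pvTier, h0]
        · rw [hr]; simp [pvTier, h1]
        · rw [hr]; simp [pvTier, h2]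
        · rw [hr] at hgt; omega
      · rw [if_neg hgt, max_eq_left (by omega)]
    rw [step, ih _ (by have := pvRk_ge (pvNrm l); omega) (by have := pvRk_le_two (pvNrm l); omega)]
    simp only [pvMx]

lemma A_eq_tier (labels : List String) :
    best_confidence_label_py labels = pvTier (pvMx (-1) labels) := by
  have h := foldA_eq labels (-1) (by omega) (by omega)
  unfold best_confidence_label_py
  rw [show (("low", (-1 : Int)) : String × Int) = (pvTier (-1), -1) from rfl, h]

lemma contains_iff (labels : List String) (s : String) :
    (PySem.Set.contains (PySem.Set.ofList (labels.map (fun l => PySem.Str.lower (PySem.Str.strip l)))) s = true)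
      ↔ ∃ l ∈ labels, pvNrm l = s := by
  simp only [PySem.Set.contains_iff, PySem.Set.mem_ofList, List.mem_map, pvNrm_def]

lemma mx_eq_two_iff (labels : List String) :
    pvMx (-1) labels = 2 ↔ ∃ l ∈ labels, pvNrm l = "high" := by
  constructor
  · intro h
    rcases pvMx_eq_or_mem labels (-1) with he | ⟨l, hl, he⟩
    · omega
    · exact ⟨l, hl, (pvRk_eq_two_iff _).mp (by rw [← he, h])⟩
  · rintro ⟨l, hl, hn⟩
    have h1 := pvRk_le_pvMx labels (-1) l hl
    have h2 := pvMx_le_two labels (-1) (by omega)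
    rw [(pvRk_eq_two_iff _).mpr hn] at h1
    omega

lemma mx_eq_one_iff (labels : List String) (hnot : ¬ ∃ l ∈ labels, pvNrm l = "high") :
    pvMx (-1) labels = 1 ↔ ∃ l ∈ labels, pvNrm l = "medium" := by
  constructor
  · intro h
    rcases pvMx_eq_or_mem labels (-1) with he | ⟨l, hl, he⟩
    · omega
    · exact ⟨l, hl, (pvRk_eq_one_iff _).mp (by rw [← he, h])⟩
  · rintro ⟨l, hl, hn⟩
    have h1 := pvRk_le_pvMx labels (-1) l hl
    rw [(pvRk_eq_one_iff _).mpr hn] at h1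
    have h2 : pvMx (-1) labels ≠ 2 := fun h => hnot ((mx_eq_two_iff labels).mp h)
    have h3 := pvMx_le_two labels (-1) (by omega)
    omega

-- ===== VERDICT (by name: the statement is the Claim_ definition above) =====
theorem best_confidence_label_py_spec : Claim_equal_best_confidence_label_py := by
  intro labels _
  show best_confidence_label_py labels = best_confidence_label_py_alt labels
  rw [A_eq_tier]
  unfold best_confidence_label_py_alt
  by_cases hh : ∃ l ∈ labels, pvNrm l = "high"
  · rw [if_pos ((contains_iff labels "high").mpr hh)]
    rw [(mx_eq_two_iff labels).mpr hh]
    decide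
  · rw [if_neg (by simp only [contains_iff labels "high"]; exact hh)]
    have h2 : pvMx (-1) labels ≠ 2 := fun h => hh ((mx_eq_two_iff labels).mp h)
    by_cases hm : ∃ l ∈ labels, pvNrm l = "medium"
    · rw [if_pos ((contains_iff labels "medium").mpr hm)]
      rw [(mx_eq_one_iff labels hh).mpr hm]
      decide
    · rw [if_neg (by simp only [contains_iff labels "medium"]; exact hm)]
      have h1 : pvMx (-1) labels ≠ 1 := fun h => hm ((mx_eq_one_iff labels hh).mp h)
      unfold pvTier
      rw [if_neg h2, if_neg h1]
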